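-- pv_equiv track=rewrite | github.com/RationAI/ciao | ciao/data/segmentation.py | _build_fast_adjacency_list
-- ===== SOURCE A (Python) =====
-- def _build_fast_adjacency_list(
--     hex_to_id: dict[tuple[int, int], int], max_id: int
-- ) -> tuple[tuple[int, ...], ...]:
--     """Create a static adjacency list optimized for fast reading.
--
--     Args:
--         hex_to_id: Dict mapping (q, r) -> int_id (0 to N-1)
--         max_id: Total number of segments (N)
--
--     Returns:
--         adj_list: Tuple of Tuples.
--                   adj_list[5] returns e.g. (4, 6, 12) - neighbors of segment 5.
--     """
--     # Initialize empty lists for each ID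
--     # Use list of lists for construction
--     temp_adj: list[list[int]] = [[] for _ in range(max_id)]
--
--     # Offsets for neighbors (axial coords)
--     hex_neighbors = [(+1, 0), (+1, -1), (0, -1), (-1, 0), (-1, +1), (0, +1)]
--
--     for (q, r), seg_id in hex_to_id.items():
--         for dq, dr in hex_neighbors:
--             neighbor_key = (q + dq, r + dr)
--
--             # If neighbor exists (is within the image)
--             if neighbor_key in hex_to_id:
--                 neighbor_id = hex_to_id[neighbor_key]
--                 temp_adj[seg_id].append(neighbor_id)
--
--     # Convert to tuple of tuples for maximum read speed and memory efficiency
--     # Sort neighbors (optional, but good for determinism)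
--     final_adj = tuple(tuple(sorted(neighbors)) for neighbors in temp_adj)
--
--     return final_adj
-- ===== SOURCE B (Python) =====
-- def _build_fast_adjacency_list(hex_to_id, max_id):
--     # Sort-merge join: sort the cells by coordinate once; for each of the three
--     # positive axial directions, a two-pointer merge of the sorted cells against
--     # the same list shifted by that direction finds every adjacent pair, and each
--     # pair is recorded symmetrically (covering all six neighbor offsets).
--     adj = [[] for _ in range(max_id)]
--     cells = sorted(hex_to_id.items(), key=lambda t: t[0])
--     for dq, dr in ((1, 0), (1, -1), (0, -1)):
--         shifted = [((q + dq, r + dr), i) for (q, r), i in cells]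
--         i = j = 0
--         while i < len(cells) and j < len(shifted):
--             ck, a = cells[i]
--             sk, b = shifted[j]
--             if ck < sk:
--                 i += 1
--             elif sk < ck:
--                 j += 1
--             else:
--                 adj[a].append(b)
--                 adj[b].append(a)
--                 i += 1
--                 j += 1
--     return tuple(tuple(sorted(ns)) for ns in adj)
-- ===== Notes on version B (the rewrite author's own statement) =====
-- stated objective: alternative
-- what changed: Replaces A's per-cell six-offset dict-membership gather by a sort-merge join: cells are sorted by coordinate once and, for each of the three positive axial directions, a two-pointer merge of the sorted list against its shifted copy finds every adjacent pair, which is recorded symmetrically into both endpoints' lists; no dict membership test remains.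
import Mathlib
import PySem

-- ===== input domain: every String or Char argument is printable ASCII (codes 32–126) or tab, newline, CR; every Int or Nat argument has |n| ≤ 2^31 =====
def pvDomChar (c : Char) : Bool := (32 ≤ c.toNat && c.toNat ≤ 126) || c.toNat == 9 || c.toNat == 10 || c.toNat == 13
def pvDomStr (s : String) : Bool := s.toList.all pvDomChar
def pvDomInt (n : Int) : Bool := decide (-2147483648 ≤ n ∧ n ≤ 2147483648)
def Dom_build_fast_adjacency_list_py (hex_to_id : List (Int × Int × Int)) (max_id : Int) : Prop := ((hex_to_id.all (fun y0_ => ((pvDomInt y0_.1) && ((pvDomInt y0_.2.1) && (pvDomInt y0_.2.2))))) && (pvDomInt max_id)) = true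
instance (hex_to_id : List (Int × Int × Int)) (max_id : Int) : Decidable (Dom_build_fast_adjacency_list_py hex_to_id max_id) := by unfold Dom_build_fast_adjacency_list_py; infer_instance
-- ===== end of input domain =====

-- B replaces A's per-cell six-offset membership gather by a sort-merge join: the cells are
-- sorted by coordinate once and, for each of the three positive axial directions, a
-- two-pointer merge of the sorted list against its shifted copy finds every adjacent pair,
-- recorded symmetrically; objective: alternative (different algorithm of similar cost).

-- ===== PORT A =====
def hexNeighbors : List (Int × Int) := [(1, 0), (1, -1), (0, -1), (-1, 0), (-1, 1), (0, 1)]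

-- dict lookup hex_to_id[(q, r)] on the association list (first match; Pre_ makes keys unique)
def hexGet? (h : List (Int × Int × Int)) (q r : Int) : Option Int :=
  (h.find? (fun e => decide (e.1 = q ∧ e.2.1 = r))).map (fun e => e.2.2)

-- Python negative-index normalization for a list of length len
def pyIdxN (len : Nat) (i : Int) : Int := if i < 0 then (len : Int) + i else i

-- Python temp_adj[i].append(v): a negative index wraps; an out-of-range index raises
-- IndexError (excluded by Pre_), modeled as a no-op there
def pyAppendAt (l : List (List Int)) (i v : Int) : List (List Int) :=
  if 0 ≤ pyIdxN l.length i ∧ pyIdxN l.length i < (l.length : Int) then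
    l.set (pyIdxN l.length i).toNat (l[(pyIdxN l.length i).toNat]?.getD [] ++ [v])
  else l

def build_fast_adjacency_list_py (hex_to_id : List (Int × Int × Int)) (max_id : Int) : List (List Int) :=
  let temp0 : List (List Int) := List.replicate max_id.toNat []
  let temp := hex_to_id.foldl (fun acc e =>
    hexNeighbors.foldl (fun acc2 d =>
      match hexGet? hex_to_id (e.1 + d.1) (e.2.1 + d.2) with
      | some nid => pyAppendAt acc2 e.2.2 nid
      | none => acc2) acc) temp0
  temp.map (fun ns => PySem.List.sorted ns (fun x => x) false)

-- ===== PORT B =====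
def mergeDirs : List (Int × Int) := [(1, 0), (1, -1), (0, -1)]

-- the two-pointer while loop (advancing an index = recursing on the list tail);
-- Python's tuple comparison ck < sk is the lexicographic order toLex
def mergeLoop : List ((Int × Int) × Int) → List ((Int × Int) × Int) → List (List Int) → List (List Int)
  | [], _, adj => adj
  | _ :: _, [], adj => adj
  | (ck, a) :: cs, (sk, b) :: ss, adj =>
    if toLex ck < toLex sk then mergeLoop cs ((sk, b) :: ss) adj
    else if toLex sk < toLex ck then mergeLoop ((ck, a) :: cs) ss adj
    else mergeLoop cs ss (pyAppendAt (pyAppendAt adj a b) b a)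

def build_fast_adjacency_list_py_alt (hex_to_id : List (Int × Int × Int)) (max_id : Int) : List (List Int) :=
  let adj0 : List (List Int) := List.replicate max_id.toNat []
  let cells := PySem.List.sorted (hex_to_id.map (fun e => ((e.1, e.2.1), e.2.2)))
    (fun t => toLex t.1) false
  let adj := mergeDirs.foldl (fun adj d =>
    mergeLoop cells (cells.map (fun t => ((t.1.1 + d.1, t.1.2 + d.2), t.2))) adj) adj0
  adj.map (fun ns => PySem.List.sorted ns (fun x => x) false)

-- ===== PRECONDITION & SPEC =====
-- Pre_ excludes (a) association lists with duplicate coordinate keys, which a Python dict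
-- cannot represent (insertion overwrites), and (b) inputs where a cell with at least one
-- neighbor has an id outside [-max_id, max_id), on which A raises IndexError.
def Pre_build_fast_adjacency_list_py (hex_to_id : List (Int × Int × Int)) (max_id : Int) : Prop :=
  (hex_to_id.map (fun e => (e.1, e.2.1))).Nodup ∧
  ∀ e ∈ hex_to_id, ∀ e' ∈ hex_to_id,
    (e'.1 - e.1, e'.2.1 - e.2.1) ∈ ([(1, 0), (1, -1), (0, -1), (-1, 0), (-1, 1), (0, 1)] : List (Int × Int)) →
    -max_id ≤ e.2.2 ∧ e.2.2 < max_id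

instance (hex_to_id : List (Int × Int × Int)) (max_id : Int) : Decidable (Pre_build_fast_adjacency_list_py hex_to_id max_id) := by
  unfold Pre_build_fast_adjacency_list_py; infer_instance

def pvWitness_build_fast_adjacency_list_py : (List (Int × Int × Int)) × Int :=
  ([(0, 0, 0), (1, 0, 1), (0, 1, 2)], 3)

def Spec_build_fast_adjacency_list_py (hex_to_id : List (Int × Int × Int)) (max_id : Int) (out : List (List Int)) : Prop := out = build_fast_adjacency_list_py_alt hex_to_id max_id
instance (hex_to_id : List (Int × Int × Int)) (max_id : Int) (out : List (List Int)) : Decidable (Spec_build_fast_adjacency_list_py hex_to_id max_id out) := by unfold Spec_build_fast_adjacency_list_py; infer_instance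

-- ===== CLAIM (what is proved, stated in full; the proofs are below) =====
def Claim_equal_build_fast_adjacency_list_py : Prop := ∀ (hex_to_id : List (Int × Int × Int)) (max_id : Int), Dom_build_fast_adjacency_list_py hex_to_id max_id → Pre_build_fast_adjacency_list_py hex_to_id max_id → Spec_build_fast_adjacency_list_py hex_to_id max_id (build_fast_adjacency_list_py hex_to_id max_id)

-- ===== LEMMAS AND PROOFS =====

-- projection of an entry (q, r, i) to the dict item ((q, r), i)
def projE (e : Int × Int × Int) : (Int × Int) × Int := ((e.1, e.2.1), e.2.2)

-- one append, as a step on a "dart" (slot id, appended value)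
def dartStep (adj : List (List Int)) (p : Int × Int) : List (List Int) := pyAppendAt adj p.1 p.2

-- all (slot, value) appends A performs for one entry, then for the whole dict
def dartsOfEntry (h : List (Int × Int × Int)) (e : Int × Int × Int) : List (Int × Int) :=
  hexNeighbors.flatMap (fun d =>
    ((hexGet? h (e.1 + d.1) (e.2.1 + d.2)).map (fun x => (e.2.2, x))).toList)

def dartsA (h : List (Int × Int × Int)) : List (Int × Int) := h.flatMap (dartsOfEntry h)

-- the matched id pairs a two-pointer merge of cs against ss discovers
def matchedPairs (cs ss : List ((Int × Int) × Int)) : List (Int × Int) :=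
  cs.filterMap (fun c => (ss.find? (fun s => s.1 == c.1)).map (fun s => (c.2, s.2)))

def cellsOf (h : List (Int × Int × Int)) : List ((Int × Int) × Int) :=
  PySem.List.sorted (h.map (fun e => ((e.1, e.2.1), e.2.2))) (fun t => toLex t.1) false

def shiftC (d : Int × Int) (t : (Int × Int) × Int) : (Int × Int) × Int :=
  ((t.1.1 + d.1, t.1.2 + d.2), t.2)

def dartsB (h : List (Int × Int × Int)) : List (Int × Int) :=
  mergeDirs.flatMap (fun d =>
    (matchedPairs (cellsOf h) ((cellsOf h).map (shiftC d))).flatMap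
      (fun p => [(p.1, p.2), (p.2, p.1)]))

-- a dart harvested from cell t by looking dl away inside the cell list C
def dartOfD (C : List ((Int × Int) × Int)) (dl : Int × Int) (t : (Int × Int) × Int) :
    Option (Int × Int) :=
  (C.find? (fun u => u.1 == (t.1.1 + dl.1, t.1.2 + dl.2))).map (fun u => (t.2, u.2))

-- ---- generic list lemmas ----

lemma flatMap_append_perm {A B : Type} (l : List A) (f g : A → List B) :
    (l.flatMap (fun x => f x ++ g x)).Perm (l.flatMap f ++ l.flatMap g) := by
  induction l with
  | nil => simp
  | cons a l ih =>
    simp only [List.flatMap_cons]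
    refine ((ih.append_left (f a ++ g a)).trans ?_)
    rw [List.append_assoc, List.append_assoc]
    refine ((List.perm_append_comm_assoc (g a) (l.flatMap f) (l.flatMap g)).append_left (f a)).trans ?_
    simp

lemma flatMap_swap_perm {A B C : Type} (l1 : List A) (l2 : List B) (f : A → B → List C) :
    (l1.flatMap fun a => l2.flatMap fun b => f a b).Perm
      (l2.flatMap fun b => l1.flatMap fun a => f a b) := by
  induction l1 with
  | nil => simp
  | cons a l ih =>
    simp only [List.flatMap_cons]
    refine (ih.append_left _).trans ?_
    exact (flatMap_append_perm l2 (fun b => f a b) (fun b => l.flatMap fun a' => f a' b)).symm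

lemma filterMap_eq_flatMap_toList {A B : Type} (l : List A) (f : A → Option B) :
    l.filterMap f = l.flatMap (fun x => (f x).toList) := by
  induction l with
  | nil => rfl
  | cons a l ih => cases h : f a <;> simp [h, ih]

lemma flatMap_map_eq {A B C : Type} (l : List A) (f : A → B) (g : B → List C) :
    (l.map f).flatMap g = l.flatMap (fun x => g (f x)) := by
  induction l with
  | nil => rfl
  | cons a l ih => simp [List.flatMap_cons, ih]

lemma flatMap_two_split (l : List (Int × Int)) :
    (l.flatMap (fun p => [p, (p.2, p.1)])).Perm (l ++ l.map (fun p => (p.2, p.1))) := by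
  induction l with
  | nil => simp
  | cons p l ih =>
    simp only [List.flatMap_cons, List.map_cons, List.cons_append]
    refine List.Perm.cons p ?_
    refine ((ih.cons _)).trans ?_
    exact List.perm_middle.symm

-- first match under distinct keys is exactly membership
lemma find?_key_eq_some_iff {l : List ((Int × Int) × Int)}
    (hnd : (l.map (fun t => t.1)).Nodup) (k : Int × Int) (t : (Int × Int) × Int) :
    l.find? (fun s => s.1 == k) = some t ↔ t ∈ l ∧ t.1 = k := by
  induction l with
  | nil => simp
  | cons u l ih =>
    simp only [List.map_cons, List.nodup_cons] at hnd
    rw [List.find?_cons]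
    by_cases hu : u.1 = k
    · simp only [hu, beq_self_eq_true]
      constructor
      · rintro ⟨rfl⟩
        exact ⟨List.mem_cons_self, hu⟩
      · rintro ⟨hmem, htk⟩
        rcases List.mem_cons.mp hmem with rfl | hmem
        · rfl
        · exfalso
          apply hnd.1
          have h1 : t.1 ∈ List.map (fun t => t.1) l := List.mem_map_of_mem hmem
          rw [htk] at h1
          rw [hu]
          exact h1
    · have hb : (u.1 == k) = false := by simpa using hu
      rw [hb, ih hnd.2]
      constructor
      · rintro ⟨hm, hk⟩
        exact ⟨List.mem_cons_of_mem _ hm, hk⟩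
      · rintro ⟨hmem, htk⟩
        rcases List.mem_cons.mp hmem with rfl | hmem
        · exact absurd htk hu
        · exact ⟨hmem, htk⟩

lemma find?_key_eq_of_perm {l l' : List ((Int × Int) × Int)}
    (hnd : (l.map (fun t => t.1)).Nodup) (hp : l.Perm l') (k : Int × Int) :
    l.find? (fun s => s.1 == k) = l'.find? (fun s => s.1 == k) := by
  have hnd' : (l'.map (fun t => t.1)).Nodup := ((hp.map _).nodup_iff).mp hnd
  cases hfl : l'.find? (fun s => s.1 == k) with
  | some t =>
    exact (find?_key_eq_some_iff hnd k t).mpr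
      (by rcases (find?_key_eq_some_iff hnd' k t).mp hfl with ⟨hm, hk⟩
          exact ⟨hp.mem_iff.mpr hm, hk⟩)
  | none =>
    rw [List.find?_eq_none] at hfl ⊢
    intro x hx
    exact hfl x (hp.mem_iff.mp hx)

-- ---- facts about pyAppendAt / dart folds ----

lemma length_pyAppendAt (l : List (List Int)) (i v : Int) :
    (pyAppendAt l i v).length = l.length := by
  unfold pyAppendAt; split <;> simp

lemma getD_pyAppendAt (l : List (List Int)) (i v : Int)
    (h0 : -(l.length : Int) ≤ i) (h1 : i < (l.length : Int)) (n : Nat) (hn : n < l.length) :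
    (pyAppendAt l i v)[n]?.getD [] =
      if pyIdxN l.length i = (n : Int) then l[n]?.getD [] ++ [v] else l[n]?.getD [] := by
  have hin : 0 ≤ pyIdxN l.length i ∧ pyIdxN l.length i < (l.length : Int) := by
    unfold pyIdxN; split <;> omega
  unfold pyAppendAt
  rw [if_pos hin]
  by_cases he : pyIdxN l.length i = (n : Int)
  · have hix : (pyIdxN l.length i).toNat = n := by omega
    simp [hn, he]
  · have hne : (pyIdxN l.length i).toNat ≠ n := by omega
    simp [List.getElem?_set_ne hne, he]

lemma length_foldl_dartStep (darts : List (Int × Int)) (adj : List (List Int)) :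
    (darts.foldl dartStep adj).length = adj.length := by
  induction darts generalizing adj with
  | nil => rfl
  | cons p darts ih => simp [List.foldl_cons, ih, dartStep, length_pyAppendAt]

lemma slot_foldl_darts (darts : List (Int × Int)) :
    ∀ (adj : List (List Int)),
      (∀ p ∈ darts, -(adj.length : Int) ≤ p.1 ∧ p.1 < (adj.length : Int)) →
      ∀ n, n < adj.length →
      (darts.foldl dartStep adj)[n]?.getD [] =
        adj[n]?.getD [] ++
          (darts.filter (fun p => pyIdxN adj.length p.1 == (n : Int))).map (fun p => p.2) := by
  induction darts with
  | nil => intro adj _ n _; simp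
  | cons p darts ih =>
    intro adj hb n hn
    have hbp := hb p (by simp)
    have hlen : (dartStep adj p).length = adj.length := by
      simp [dartStep, length_pyAppendAt]
    simp only [List.foldl_cons, List.filter_cons]
    rw [ih (dartStep adj p) (by intro q hq; rw [hlen]; exact hb q (by simp [hq])) n (by omega)]
    have hstep := getD_pyAppendAt adj p.1 p.2 hbp.1 hbp.2 n hn
    simp only [dartStep, length_pyAppendAt] at *
    by_cases he : pyIdxN adj.length p.1 = (n : Int)
    · rw [hstep, if_pos he]
      simp [he]
    · rw [hstep, if_neg he]
      simp [he]

-- ---- the A port as a fold over its darts ----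

lemma inner_fold_eq (h : List (Int × Int × Int)) (e : Int × Int × Int) (acc : List (List Int)) :
    hexNeighbors.foldl (fun acc2 d =>
      match hexGet? h (e.1 + d.1) (e.2.1 + d.2) with
      | some nid => pyAppendAt acc2 e.2.2 nid
      | none => acc2) acc = (dartsOfEntry h e).foldl dartStep acc := by
  unfold dartsOfEntry
  rw [List.foldl_flatMap]
  congr 1
  funext acc2 d
  cases hg : hexGet? h (e.1 + d.1) (e.2.1 + d.2) <;> simp [dartStep]

lemma A_as_darts (h : List (Int × Int × Int)) (m : Int) :
    build_fast_adjacency_list_py h m =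
      ((dartsA h).foldl dartStep (List.replicate m.toNat [])).map
        (fun ns => PySem.List.sorted ns (fun x => x) false) := by
  unfold build_fast_adjacency_list_py dartsA
  rw [List.foldl_flatMap]
  simp only [inner_fold_eq]

-- ---- the merge loop as a fold over the matched pairs ----

lemma matched_nil_right (cs : List ((Int × Int) × Int)) : matchedPairs cs [] = [] := by
  unfold matchedPairs
  simp

lemma matched_drop_head (s : (Int × Int) × Int) (ss : List ((Int × Int) × Int))
    (cs : List ((Int × Int) × Int)) (hlt : ∀ c ∈ cs, toLex s.1 < toLex c.1) :
    matchedPairs cs (s :: ss) = matchedPairs cs ss := by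
  unfold matchedPairs
  apply List.filterMap_congr
  intro c hc
  rw [List.find?_cons]
  have hb : (s.1 == c.1) = false := by
    have hl := hlt c hc
    simp only [beq_eq_false_iff_ne, ne_eq]
    intro heq
    rw [heq] at hl
    exact lt_irrefl _ hl
  rw [hb]

lemma matched_cons_none (c : (Int × Int) × Int) (cs ss : List ((Int × Int) × Int))
    (hnone : ss.find? (fun s => s.1 == c.1) = none) :
    matchedPairs (c :: cs) ss = matchedPairs cs ss := by
  unfold matchedPairs
  simp [hnone]

lemma matched_cons_some (c : (Int × Int) × Int) (cs ss : List ((Int × Int) × Int))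
    (s : (Int × Int) × Int) (hsome : ss.find? (fun s => s.1 == c.1) = some s) :
    matchedPairs (c :: cs) ss = (c.2, s.2) :: matchedPairs cs ss := by
  unfold matchedPairs
  simp [hsome]

lemma merge_eq : ∀ (cs ss : List ((Int × Int) × Int)) (adj : List (List Int)),
    cs.Pairwise (fun t u => toLex t.1 < toLex u.1) →
    ss.Pairwise (fun t u => toLex t.1 < toLex u.1) →
    mergeLoop cs ss adj =
      (matchedPairs cs ss).foldl
        (fun adj p => pyAppendAt (pyAppendAt adj p.1 p.2) p.2 p.1) adj := by
  intro cs ss adj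
  induction cs, ss, adj using mergeLoop.induct with
  | case1 ss adj =>
    intro _ _
    simp [mergeLoop, matchedPairs]
  | case2 cs adj =>
    intro _ _
    simp [mergeLoop, matched_nil_right]
  | case3 ck a cs sk b ss adj hlt ih =>
    intro hcs hss
    rw [mergeLoop, if_pos hlt]
    have hnone : (((sk, b) :: ss).find? (fun s => s.1 == ((ck, a) : (Int × Int) × Int).1)) = none := by
      rw [List.find?_eq_none]
      intro u hu hbe
      have heq : u.1 = ck := by simpa using hbe
      rcases List.mem_cons.mp hu with rfl | hu'
      · have hsk : sk = ck := heq
        rw [hsk] at hlt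
        exact lt_irrefl _ hlt
      · have h2 := (List.pairwise_cons.mp hss).1 u hu'
        rw [heq] at h2
        exact lt_irrefl _ (hlt.trans h2)
    rw [matched_cons_none _ _ _ hnone]
    exact ih (List.pairwise_cons.mp hcs).2 hss
  | case4 ck a cs sk b ss adj hlt1 hlt2 ih =>
    intro hcs hss
    rw [mergeLoop, if_neg hlt1, if_pos hlt2]
    rw [matched_drop_head (sk, b) ss ((ck, a) :: cs) ?side]
    · exact ih hcs (List.pairwise_cons.mp hss).2
    case side =>
      intro c hc
      rcases List.mem_cons.mp hc with rfl | hc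
      · exact hlt2
      · exact hlt2.trans ((List.pairwise_cons.mp hcs).1 c hc)
  | case5 ck a cs sk b ss adj hlt1 hlt2 ih =>
    intro hcs hss
    rw [mergeLoop, if_neg hlt1, if_neg hlt2]
    have hkey : sk = ck := toLex.injective (le_antisymm (not_lt.mp hlt1) (not_lt.mp hlt2))
    have hhead : (((sk, b) :: ss).find? (fun s => s.1 == ((ck, a) : (Int × Int) × Int).1)) = some (sk, b) := by
      rw [List.find?_cons]
      have hb : (((sk, b) : (Int × Int) × Int).1 == ((ck, a) : (Int × Int) × Int).1) = true := by
        simpa using hkey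
      rw [hb]
    have hdrop : matchedPairs cs ((sk, b) :: ss) = matchedPairs cs ss := by
      apply matched_drop_head
      intro c hc
      have h3 := (List.pairwise_cons.mp hcs).1 c hc
      show toLex sk < toLex c.1
      rw [hkey]
      exact h3
    rw [matched_cons_some _ _ _ _ hhead, List.foldl_cons, hdrop]
    exact ih (List.pairwise_cons.mp hcs).2 (List.pairwise_cons.mp hss).2

-- ---- cells facts ----

lemma cells_perm (h : List (Int × Int × Int)) : (cellsOf h).Perm (h.map projE) :=
  PySem.List.sorted_perm _ _ _

lemma cells_keys_nodup (h : List (Int × Int × Int))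
    (hnd : (h.map (fun e => (e.1, e.2.1))).Nodup) :
    ((cellsOf h).map (fun t => t.1)).Nodup := by
  refine (((cells_perm h).map (fun t => t.1)).nodup_iff).mpr ?_
  rw [List.map_map]
  exact hnd

lemma cells_pairwise (h : List (Int × Int × Int))
    (hnd : (h.map (fun e => (e.1, e.2.1))).Nodup) :
    (cellsOf h).Pairwise (fun t u => toLex t.1 < toLex u.1) := by
  have hle : (cellsOf h).Pairwise (fun t u => toLex t.1 ≤ toLex u.1) :=
    PySem.List.sorted_pairwise _ _
  have hne : (cellsOf h).Pairwise (fun t u => t.1 ≠ u.1) :=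
    List.pairwise_map.mp (cells_keys_nodup h hnd)
  refine (hle.and hne).imp ?_
  rintro t u ⟨h1, h2⟩
  exact lt_of_le_of_ne h1 (fun hc => h2 (toLex.injective hc))

lemma shifted_pairwise (C : List ((Int × Int) × Int)) (d : Int × Int)
    (hC : C.Pairwise (fun t u => toLex t.1 < toLex u.1)) :
    (C.map (shiftC d)).Pairwise (fun t u => toLex t.1 < toLex u.1) := by
  rw [List.pairwise_map]
  refine hC.imp ?_
  intro t u hlt
  simp only [shiftC]
  rw [Prod.Lex.lt_iff] at hlt ⊢
  simp only [ofLex_toLex] at *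
  rcases hlt with h1 | ⟨h1, h2⟩
  · left; omega
  · right; constructor <;> omega

-- ---- the B port as a fold over its darts ----

lemma mergeLoop_cells_eq (h : List (Int × Int × Int))
    (hnd : (h.map (fun e => (e.1, e.2.1))).Nodup) (adj : List (List Int)) (d : Int × Int) :
    mergeLoop (cellsOf h) ((cellsOf h).map (shiftC d)) adj =
      ((matchedPairs (cellsOf h) ((cellsOf h).map (shiftC d))).flatMap
        (fun p => [(p.1, p.2), (p.2, p.1)])).foldl dartStep adj := by
  rw [merge_eq _ _ adj (cells_pairwise h hnd) (shifted_pairwise _ d (cells_pairwise h hnd)),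
    List.foldl_flatMap]
  rfl

lemma B_as_darts (h : List (Int × Int × Int)) (m : Int)
    (hnd : (h.map (fun e => (e.1, e.2.1))).Nodup) :
    build_fast_adjacency_list_py_alt h m =
      ((dartsB h).foldl dartStep (List.replicate m.toNat [])).map
        (fun ns => PySem.List.sorted ns (fun x => x) false) := by
  show (mergeDirs.foldl (fun adj d =>
      mergeLoop (cellsOf h) ((cellsOf h).map (fun t => ((t.1.1 + d.1, t.1.2 + d.2), t.2))) adj)
      (List.replicate m.toNat [])).map (fun ns => PySem.List.sorted ns (fun x => x) false) = _
  unfold dartsB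
  rw [List.foldl_flatMap]
  congr 1
  apply PySem.List.foldl_congr_mem
  intro acc d _
  exact mergeLoop_cells_eq h hnd acc d

-- ---- darts are the same multiset ----

lemma beq_pair_shift (d : Int × Int) (k : Int × Int) (t : (Int × Int) × Int) :
    ((shiftC d t).1 == k) = (t.1 == (k.1 - d.1, k.2 - d.2)) := by
  rw [Bool.eq_iff_iff]
  simp only [beq_iff_eq, shiftC, Prod.ext_iff]
  constructor <;> rintro ⟨h1, h2⟩ <;> exact ⟨by omega, by omega⟩

lemma matched_shift (h : List (Int × Int × Int)) (d : Int × Int) :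
    matchedPairs (cellsOf h) ((cellsOf h).map (shiftC d)) =
      (cellsOf h).filterMap (dartOfD (cellsOf h) (-d.1, -d.2)) := by
  unfold matchedPairs dartOfD
  apply List.filterMap_congr
  intro c _
  rw [List.find?_map]
  have hpred : ((fun s => s.1 == c.1) ∘ shiftC d) =
      (fun t : (Int × Int) × Int => t.1 == (c.1.1 + -d.1, c.1.2 + -d.2)) := by
    funext t
    have := beq_pair_shift d c.1 t
    simp only [Function.comp]
    rw [this]
    congr 2
  rw [hpred, Option.map_map]
  rfl

lemma mem_pairsF {C : List ((Int × Int) × Int)} (hk : (C.map (fun t => t.1)).Nodup)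
    (d : Int × Int) (q : ((Int × Int) × Int) × ((Int × Int) × Int)) :
    q ∈ C.filterMap (fun c => (C.find? (fun t => t.1 == (c.1.1 - d.1, c.1.2 - d.2))).map
        (fun t => (c, t))) ↔
      q.1 ∈ C ∧ q.2 ∈ C ∧ q.2.1.1 = q.1.1.1 - d.1 ∧ q.2.1.2 = q.1.1.2 - d.2 := by
  rw [List.mem_filterMap]
  constructor
  · rintro ⟨c, hc, hfc⟩
    rw [Option.map_eq_some_iff] at hfc
    rcases hfc with ⟨t, hft, hq⟩
    rcases (find?_key_eq_some_iff hk _ t).mp hft with ⟨htm, htk⟩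
    subst hq
    refine ⟨hc, htm, ?_, ?_⟩ <;> rw [htk]
  · rintro ⟨h1, h2, h3, h4⟩
    refine ⟨q.1, h1, ?_⟩
    rw [Option.map_eq_some_iff]
    refine ⟨q.2, ?_, rfl⟩
    refine (find?_key_eq_some_iff hk _ q.2).mpr ⟨h2, ?_⟩
    rw [Prod.ext_iff]
    exact ⟨h3, h4⟩

lemma mem_pairsR {C : List ((Int × Int) × Int)} (hk : (C.map (fun t => t.1)).Nodup)
    (d : Int × Int) (q : ((Int × Int) × Int) × ((Int × Int) × Int)) :
    q ∈ C.filterMap (fun t => (C.find? (fun c => c.1 == (t.1.1 + d.1, t.1.2 + d.2))).map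
        (fun c => (c, t))) ↔
      q.2 ∈ C ∧ q.1 ∈ C ∧ q.1.1.1 = q.2.1.1 + d.1 ∧ q.1.1.2 = q.2.1.2 + d.2 := by
  rw [List.mem_filterMap]
  constructor
  · rintro ⟨t, ht, hft⟩
    rw [Option.map_eq_some_iff] at hft
    rcases hft with ⟨c, hfc, hq⟩
    rcases (find?_key_eq_some_iff hk _ c).mp hfc with ⟨hcm, hck⟩
    subst hq
    refine ⟨ht, hcm, ?_, ?_⟩ <;> rw [hck]
  · rintro ⟨h1, h2, h3, h4⟩
    refine ⟨q.2, h1, ?_⟩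
    rw [Option.map_eq_some_iff]
    refine ⟨q.1, ?_, rfl⟩
    refine (find?_key_eq_some_iff hk _ q.1).mpr ⟨h2, ?_⟩
    rw [Prod.ext_iff]
    exact ⟨h3, h4⟩

lemma pairs_swap (C : List ((Int × Int) × Int)) (hk : (C.map (fun t => t.1)).Nodup)
    (d : Int × Int) :
    (C.filterMap (fun c => (C.find? (fun t => t.1 == (c.1.1 - d.1, c.1.2 - d.2))).map
        (fun t => (c, t)))).Perm
      (C.filterMap (fun t => (C.find? (fun c => c.1 == (t.1.1 + d.1, t.1.2 + d.2))).map
        (fun c => (c, t)))) := by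
  have hCnd : C.Nodup := List.Nodup.of_map _ hk
  refine (List.perm_ext_iff_of_nodup ?_ ?_).mpr ?_
  · refine List.Nodup.filterMap ?_ hCnd
    intro a a' b hb hb'
    rw [Option.mem_def, Option.map_eq_some_iff] at hb hb'
    rcases hb with ⟨t, _, rfl⟩
    rcases hb' with ⟨t', _, hq'⟩
    injection hq' with h1 _
    exact h1.symm
  · refine List.Nodup.filterMap ?_ hCnd
    intro a a' b hb hb'
    rw [Option.mem_def, Option.map_eq_some_iff] at hb hb'
    rcases hb with ⟨c, _, rfl⟩
    rcases hb' with ⟨c', _, hq'⟩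
    injection hq' with _ h2
    exact h2.symm
  · intro q
    rw [mem_pairsF hk d q, mem_pairsR hk d q]
    constructor <;> rintro ⟨h1, h2, h3, h4⟩
    · exact ⟨h2, h1, by omega, by omega⟩
    · exact ⟨h2, h1, by omega, by omega⟩

-- role2 list of direction d rewritten through the coordinate bijection
lemma role2_perm (C : List ((Int × Int) × Int)) (hk : (C.map (fun t => t.1)).Nodup)
    (d : Int × Int) :
    ((C.filterMap (dartOfD C (-d.1, -d.2))).map (fun p => (p.2, p.1))).Perm
      (C.filterMap (dartOfD C d)) := by
  have hm : (C.filterMap (dartOfD C (-d.1, -d.2))).map (fun p => (p.2, p.1)) =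
      (C.filterMap (fun c => (C.find? (fun t => t.1 == (c.1.1 - d.1, c.1.2 - d.2))).map
        (fun t => (c, t)))).map (fun q => (q.2.2, q.1.2)) := by
    rw [List.map_filterMap, List.map_filterMap]
    apply List.filterMap_congr
    intro c _
    unfold dartOfD
    rw [Option.map_map, Option.map_map]
    have harg : (fun u : (Int × Int) × Int => u.1 == (c.1.1 + -d.1, c.1.2 + -d.2)) =
        (fun t : (Int × Int) × Int => t.1 == (c.1.1 - d.1, c.1.2 - d.2)) := by
      funext t
      congr 2
    rw [harg]
    rfl
  rw [hm]
  refine ((pairs_swap C hk d).map _).trans ?_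
  rw [List.map_filterMap]
  apply List.Perm.of_eq
  apply List.filterMap_congr
  intro t _
  unfold dartOfD
  rw [Option.map_map]
  rfl

lemma dartOfD_projE (h : List (Int × Int × Int))
    (hnd : (h.map (fun e => (e.1, e.2.1))).Nodup) (dl : Int × Int) (e : Int × Int × Int) :
    dartOfD (cellsOf h) dl (projE e) =
      (hexGet? h (e.1 + dl.1) (e.2.1 + dl.2)).map (fun x => (e.2.2, x)) := by
  unfold dartOfD
  rw [find?_key_eq_of_perm (cells_keys_nodup h hnd) (cells_perm h), List.find?_map]
  have hpred : ((fun u : (Int × Int) × Int => u.1 == ((projE e).1.1 + dl.1, (projE e).1.2 + dl.2)) ∘ projE) =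
      (fun e' : Int × Int × Int => decide (e'.1 = e.1 + dl.1 ∧ e'.2.1 = e.2.1 + dl.2)) := by
    funext e'
    rw [Bool.eq_iff_iff]
    simp [projE, Prod.ext_iff]
  rw [hpred]
  unfold hexGet?
  rw [Option.map_map, Option.map_map]
  rfl

lemma darts_perm (h : List (Int × Int × Int))
    (hnd : (h.map (fun e => (e.1, e.2.1))).Nodup) :
    (dartsB h).Perm (dartsA h) := by
  have hk := cells_keys_nodup h hnd
  have hsplit : ∀ d ∈ mergeDirs,
      ((matchedPairs (cellsOf h) ((cellsOf h).map (shiftC d))).flatMap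
          (fun p => [(p.1, p.2), (p.2, p.1)])).Perm
        ((cellsOf h).filterMap (dartOfD (cellsOf h) (-d.1, -d.2)) ++
         (cellsOf h).filterMap (dartOfD (cellsOf h) d)) := by
    intro d _
    refine (flatMap_two_split _).trans ?_
    rw [matched_shift h d]
    exact (List.Perm.refl _).append (role2_perm (cellsOf h) hk d)
  unfold dartsB
  refine (List.Perm.flatMap (List.Perm.refl mergeDirs) hsplit).trans ?_
  have hmid : (mergeDirs.flatMap (fun d =>
      (cellsOf h).filterMap (dartOfD (cellsOf h) (-d.1, -d.2)) ++
      (cellsOf h).filterMap (dartOfD (cellsOf h) d))).Perm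
      (hexNeighbors.flatMap (fun dl => (cellsOf h).filterMap (dartOfD (cellsOf h) dl))) := by
    apply List.perm_iff_count.mpr
    intro p
    simp only [mergeDirs, hexNeighbors, List.flatMap_cons, List.flatMap_nil, List.append_nil,
      List.count_append]
    norm_num
    simp only [show ∀ dl : Int × Int, (fun x => dartOfD (cellsOf h) dl x) = dartOfD (cellsOf h) dl from fun _ => rfl]
    omega
  refine hmid.trans ?_
  have h1 : hexNeighbors.flatMap (fun dl => (cellsOf h).filterMap (dartOfD (cellsOf h) dl)) =
      hexNeighbors.flatMap (fun dl => (cellsOf h).flatMap (fun t => (dartOfD (cellsOf h) dl t).toList)) := by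
    congr 1
    funext dl
    exact filterMap_eq_flatMap_toList _ _
  rw [h1]
  refine (flatMap_swap_perm _ _ _).trans ?_
  refine ((cells_perm h).flatMap (fun a _ => List.Perm.refl _)).trans ?_
  apply List.Perm.of_eq
  rw [flatMap_map_eq]
  unfold dartsA
  congr 1
  funext e
  unfold dartsOfEntry
  congr 1
  funext dl
  rw [dartOfD_projE h hnd dl e]

-- ---- range of the darts from Pre_ ----

lemma dartsA_range (h : List (Int × Int × Int)) (m : Int)
    (hpre : Pre_build_fast_adjacency_list_py h m) :
    ∀ p ∈ dartsA h, -(m.toNat : Int) ≤ p.1 ∧ p.1 < (m.toNat : Int) := by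
  rintro p hp
  unfold dartsA dartsOfEntry at hp
  rw [List.mem_flatMap] at hp
  rcases hp with ⟨e, he, hp⟩
  rw [List.mem_flatMap] at hp
  rcases hp with ⟨d, hd, hp⟩
  cases hg : hexGet? h (e.1 + d.1) (e.2.1 + d.2) with
  | none => rw [hg] at hp; simp at hp
  | some x =>
    rw [hg] at hp
    simp only [Option.map_some, Option.toList_some, List.mem_singleton] at hp
    subst hp
    unfold hexGet? at hg
    rw [Option.map_eq_some_iff] at hg
    rcases hg with ⟨e', hfe', _⟩
    have he'm := List.mem_of_find?_eq_some hfe'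
    have he'p := List.find?_some hfe'
    simp only [decide_eq_true_eq] at he'p
    have hmem : (e'.1 - e.1, e'.2.1 - e.2.1) ∈
        ([(1, 0), (1, -1), (0, -1), (-1, 0), (-1, 1), (0, 1)] : List (Int × Int)) := by
      have hde : (e'.1 - e.1, e'.2.1 - e.2.1) = d := by
        rw [Prod.ext_iff]
        constructor <;> simp <;> omega
      rw [hde]
      simpa [hexNeighbors] using hd
    have hb := hpre.2 e he e' he'm hmem
    simp only
    omega

-- ===== VERDICT (by name: the statement is the Claim_ definition above) =====
theorem build_fast_adjacency_list_py_spec : Claim_equal_build_fast_adjacency_list_py := by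
  intro h m _ hpre
  unfold Spec_build_fast_adjacency_list_py
  rw [A_as_darts, B_as_darts h m hpre.1]
  have hperm := darts_perm h hpre.1
  have hrangeA := dartsA_range h m hpre
  have hrangeB : ∀ p ∈ dartsB h, -(m.toNat : Int) ≤ p.1 ∧ p.1 < (m.toNat : Int) := by
    intro p hp
    exact hrangeA p (hperm.mem_iff.mp hp)
  have hl0 : (List.replicate m.toNat ([] : List Int)).length = m.toNat := by simp
  have hlA : ((dartsA h).foldl dartStep (List.replicate m.toNat [])).length = m.toNat := by
    rw [length_foldl_dartStep, hl0]
  have hlB : ((dartsB h).foldl dartStep (List.replicate m.toNat [])).length = m.toNat := by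
    rw [length_foldl_dartStep, hl0]
  apply List.ext_getElem?
  intro n
  simp only [List.getElem?_map]
  by_cases hn : n < m.toNat
  · have hA : ((dartsA h).foldl dartStep (List.replicate m.toNat []))[n]? =
        some (((dartsA h).foldl dartStep (List.replicate m.toNat []))[n]?.getD []) := by
      rw [List.getElem?_eq_getElem (by omega : n < ((dartsA h).foldl dartStep (List.replicate m.toNat ([] : List Int))).length)]
      rfl
    have hB : ((dartsB h).foldl dartStep (List.replicate m.toNat []))[n]? =
        some (((dartsB h).foldl dartStep (List.replicate m.toNat []))[n]?.getD []) := by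
      rw [List.getElem?_eq_getElem (by omega : n < ((dartsB h).foldl dartStep (List.replicate m.toNat ([] : List Int))).length)]
      rfl
    rw [hA, hB]
    simp only [Option.map_some, Option.some_inj]
    rw [slot_foldl_darts (dartsA h) (List.replicate m.toNat []) (by rw [hl0]; exact hrangeA) n (by rw [hl0]; omega),
        slot_foldl_darts (dartsB h) (List.replicate m.toNat []) (by rw [hl0]; exact hrangeB) n (by rw [hl0]; omega)]
    have hrepl : (List.replicate m.toNat ([] : List Int))[n]?.getD [] = [] := by
      simp [hn]
    rw [hrepl, List.nil_append, List.nil_append]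
    exact (PySem.List.sorted_eq_sorted_of_perm _ _ _ (fun a b hab => hab)
      (((hperm.filter _).map _))).symm
  · have h1 : ((dartsA h).foldl dartStep (List.replicate m.toNat []))[n]? = none := by
      rw [List.getElem?_eq_none]; omega
    have h2 : ((dartsB h).foldl dartStep (List.replicate m.toNat []))[n]? = none := by
      rw [List.getElem?_eq_none]; omega
    rw [h1, h2]
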